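-- pv_equiv track=rewrite | github.com/Val-Potitova/discrete-math | Blokhina-Zagaynova/Этап 3/Checker.py | reflexivity
-- ===== SOURCE A (Python) =====
-- def reflexivity(pts, edgs):
--     count = 0
--     rflx_edges = [[i, i] for i in range(len(pts))]
--     for i in rflx_edges:
--         if i in edgs:
--             count += 1
--
--     if count == len(pts):
--         return "рефлексивно"
--     elif count == 0:
--         return "антирефлексивно"
--     else:
--         return "нерефлексивно"
-- ===== SOURCE B (Python) =====
-- def reflexivity(pts, edgs):
--     n = len(pts)
--     loops = {e[0] for e in edgs if len(e) == 2 and e[0] == e[1] and 0 <= e[0] < n}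
--     if len(loops) == n:
--         return "рефлексивно"
--     if len(loops) == 0:
--         return "антирефлексивно"
--     return "нерефлексивно"
-- ===== Notes on version B (the rewrite author's own statement) =====
-- stated objective: faster
-- what changed: B makes one pass over the edges building a set of in-range self-loop vertices instead of testing each generated [i,i] against the whole edge list.
import Mathlib
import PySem

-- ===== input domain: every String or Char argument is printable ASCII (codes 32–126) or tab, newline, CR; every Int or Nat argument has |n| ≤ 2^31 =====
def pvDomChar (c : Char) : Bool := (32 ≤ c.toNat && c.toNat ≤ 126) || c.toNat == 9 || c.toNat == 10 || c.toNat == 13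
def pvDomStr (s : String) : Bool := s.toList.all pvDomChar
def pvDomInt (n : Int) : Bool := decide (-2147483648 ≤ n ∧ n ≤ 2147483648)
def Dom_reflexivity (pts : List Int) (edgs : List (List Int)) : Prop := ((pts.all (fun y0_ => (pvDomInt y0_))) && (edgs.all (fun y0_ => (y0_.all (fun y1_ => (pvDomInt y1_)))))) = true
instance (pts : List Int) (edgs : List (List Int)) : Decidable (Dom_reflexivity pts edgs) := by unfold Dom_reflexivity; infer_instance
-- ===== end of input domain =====

-- B scans the edges once, collecting the set of in-range self-loop vertices, instead of
-- testing each generated [i,i] against the whole edge list (objective: faster).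

-- ===== PORT A =====
def reflexivity (pts : List Int) (edgs : List (List Int)) : String :=
  let rflx_edges : List (List Int) := (List.range pts.length).map (fun (i : Nat) => [(i : Int), (i : Int)])
  let count : Nat := rflx_edges.foldl (fun c e => if e ∈ edgs then c + 1 else c) 0
  if count = pts.length then "рефлексивно"
  else if count = 0 then "антирефлексивно"
  else "нерефлексивно"

-- ===== PORT B =====
-- the set comprehension: one left-to-right pass over edgs, adding in-range self-loop vertices
def reflexivity_alt (pts : List Int) (edgs : List (List Int)) : String :=
  let n : Nat := pts.length
  let loops : PySem.Set Int := edgs.foldl (fun s e =>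
    match e with
    | [a, b] => if a = b ∧ 0 ≤ a ∧ a < (n : Int) then PySem.Set.add s a else s
    | _ => s) PySem.Set.empty
  if loops.length = n then "рефлексивно"
  else if loops.length = 0 then "антирефлексивно"
  else "нерефлексивно"

-- ===== PRECONDITION & SPEC =====
def Spec_reflexivity (pts : List Int) (edgs : List (List Int)) (out : String) : Prop := out = reflexivity_alt pts edgs
instance (pts : List Int) (edgs : List (List Int)) (out : String) : Decidable (Spec_reflexivity pts edgs out) := by unfold Spec_reflexivity; infer_instance

-- ===== CLAIM (what is proved, stated in full; the proofs are below) =====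
def Claim_equal_reflexivity : Prop := ∀ (pts : List Int) (edgs : List (List Int)), Dom_reflexivity pts edgs → Spec_reflexivity pts edgs (reflexivity pts edgs)

-- ===== LEMMAS AND PROOFS =====

-- the B-side fold step
def pvStep (n : Nat) (s : PySem.Set Int) (e : List Int) : PySem.Set Int :=
  match e with
  | [a, b] => if a = b ∧ 0 ≤ a ∧ a < (n : Int) then PySem.Set.add s a else s
  | _ => s

lemma pvStep_nodup (n : Nat) (s : PySem.Set Int) (e : List Int) (h : s.Nodup) :
    (pvStep n s e).Nodup := by
  unfold pvStep
  rcases e with _ | ⟨a, _ | ⟨b, _ | _⟩⟩ <;> simp [h]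
  split
  · exact PySem.Set.nodup_add _ _ h
  · exact h

lemma pvFold_nodup (n : Nat) (edgs : List (List Int)) (s : PySem.Set Int) (h : s.Nodup) :
    (edgs.foldl (pvStep n) s).Nodup := by
  induction edgs generalizing s with
  | nil => exact h
  | cons e es ih => exact ih _ (pvStep_nodup n s e h)

lemma pvMem_step (n : Nat) (s : PySem.Set Int) (e : List Int) (x : Int) :
    x ∈ pvStep n s e ↔ x ∈ s ∨ (e = [x, x] ∧ 0 ≤ x ∧ x < (n : Int)) := by
  unfold pvStep
  rcases e with _ | ⟨a, _ | ⟨b, _ | ⟨c, t⟩⟩⟩ <;> try simp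
  split
  · rename_i hc
    obtain ⟨rfl, h0, hn⟩ := hc
    rw [PySem.Set.mem_add]
    constructor
    · rintro (h | rfl)
      · exact Or.inl h
      · exact Or.inr ⟨⟨rfl, rfl⟩, h0, hn⟩
    · rintro (h | ⟨he, -⟩)
      · exact Or.inl h
      · obtain ⟨rfl, -⟩ : a = x ∧ a = x := by simpa using he
        exact Or.inr rfl
  · rename_i hc
    constructor
    · exact Or.inl
    · rintro (h | ⟨he, h0, hn⟩)
      · exact h
      · obtain ⟨rfl, rfl⟩ : a = x ∧ b = x := by simpa using he
        exact absurd ⟨rfl, h0, hn⟩ hc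

lemma pvMem_fold (n : Nat) (edgs : List (List Int)) (s : PySem.Set Int) (x : Int) :
    x ∈ edgs.foldl (pvStep n) s ↔ x ∈ s ∨ ([x, x] ∈ edgs ∧ 0 ≤ x ∧ x < (n : Int)) := by
  induction edgs generalizing s with
  | nil => simp
  | cons e es ih =>
    simp only [List.foldl_cons, ih, pvMem_step, List.mem_cons]
    constructor
    · rintro ((h | ⟨rfl, hx⟩) | ⟨h, hx⟩)
      · exact Or.inl h
      · exact Or.inr ⟨Or.inl rfl, hx⟩
      · exact Or.inr ⟨Or.inr h, hx⟩
    · rintro (h | ⟨h | h, hx⟩)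
      · exact Or.inl (Or.inl h)
      · exact Or.inl (Or.inr ⟨h.symm, hx⟩)
      · exact Or.inr ⟨h, hx⟩

-- the A-side counting loop is a countP
lemma pvFoldl_count {α : Type} (p : α → Prop) [DecidablePred p] (l : List α) (c : Nat) :
    l.foldl (fun c e => if p e then c + 1 else c) c = c + l.countP (fun e => decide (p e)) := by
  induction l generalizing c with
  | nil => simp
  | cons e es ih =>
    by_cases h : p e
    · simp [h, ih]
      omega
    · simp [h, ih]

-- the canonical list of in-range self-loop vertices, as Ints
def pvCanon (n : Nat) (edgs : List (List Int)) : List Int :=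
  ((List.range n).filter (fun (i : Nat) => decide ([(i : Int), (i : Int)] ∈ edgs))).map
    (fun (i : Nat) => (i : Int))

lemma pvCanon_nodup (n : Nat) (edgs : List (List Int)) : (pvCanon n edgs).Nodup := by
  unfold pvCanon
  exact ((List.nodup_range).filter _).map (fun a b h => by exact_mod_cast h)

lemma pvMem_canon (n : Nat) (edgs : List (List Int)) (x : Int) :
    x ∈ pvCanon n edgs ↔ [x, x] ∈ edgs ∧ 0 ≤ x ∧ x < (n : Int) := by
  unfold pvCanon
  simp only [List.mem_map, List.mem_filter, List.mem_range, decide_eq_true_eq]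
  constructor
  · rintro ⟨i, ⟨hi, hm⟩, rfl⟩
    exact ⟨hm, by exact_mod_cast Int.natCast_nonneg i, by exact_mod_cast hi⟩
  · rintro ⟨hm, h0, hn⟩
    refine ⟨x.toNat, ⟨by omega, ?_⟩, Int.toNat_of_nonneg h0⟩
    rw [Int.toNat_of_nonneg h0]
    exact hm

lemma pvCounts_eq (n : Nat) (edgs : List (List Int)) :
    (edgs.foldl (pvStep n) PySem.Set.empty).length = (pvCanon n edgs).length := by
  have hperm : (edgs.foldl (pvStep n) PySem.Set.empty).Perm (pvCanon n edgs) := by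
    refine (List.perm_ext_iff_of_nodup (pvFold_nodup n edgs _ List.nodup_nil) (pvCanon_nodup n edgs)).2 ?_
    intro x
    rw [pvMem_fold, pvMem_canon]
    simp
  exact hperm.length_eq

-- ===== VERDICT (by name: the statement is the Claim_ definition above) =====
theorem reflexivity_spec : Claim_equal_reflexivity := by
  intro pts edgs _
  unfold Spec_reflexivity reflexivity reflexivity_alt
  simp only
  have hB : (edgs.foldl (fun s e =>
      match e with
      | [a, b] => if a = b ∧ 0 ≤ a ∧ a < (pts.length : Int) then PySem.Set.add s a else s
      | _ => s) PySem.Set.empty) = edgs.foldl (pvStep pts.length) PySem.Set.empty := rfl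
  rw [hB, pvCounts_eq, pvFoldl_count (fun e => e ∈ edgs)]
  have hA : ((List.range pts.length).map (fun (i : Nat) => [(i : Int), (i : Int)])).countP
      (fun e => decide (e ∈ edgs)) = (pvCanon pts.length edgs).length := by
    rw [List.countP_map]
    unfold pvCanon
    rw [List.length_map, List.countP_eq_length_filter]
    rfl
  rw [Nat.zero_add, hA]
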